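-- pv_equiv track=rewrite | github.com/PutuDharma1/Badminton_Tournament | Server/seed_two_tournaments.py | assign_groups
-- ===== SOURCE A (Python) =====
-- import math
--
-- def assign_groups(teams, target_size=4):
--     """Divide teams into groups of ~target_size."""
--     n = len(teams)
--     num_groups = max(1, math.ceil(n / target_size))
--     base_size = n // num_groups
--     extra = n % num_groups
--     groups = {}
--     idx = 0
--     for g in range(num_groups):
--         code = chr(ord('A') + g)
--         size = base_size + (1 if g < extra else 0)
--         groups[code] = teams[idx:idx + size]
--         idx += size
--     return groups
-- ===== SOURCE B (Python) =====
-- import math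
--
-- def assign_groups(teams, target_size=4):
--     """Divide teams into groups of ~target_size: one scatter pass over the teams."""
--     n = len(teams)
--     num_groups = max(1, math.ceil(n / target_size))
--     base, extra = divmod(n, num_groups)
--     labels = [g for g in range(num_groups) for _ in range(base + (1 if g < extra else 0))]
--     buckets = [[] for _ in range(num_groups)]
--     for team, g in zip(teams, labels):
--         buckets[g].append(team)
--     return {chr(ord('A') + g): buckets[g] for g in range(num_groups)}
-- ===== Notes on version B (the rewrite author's own statement) =====
-- stated objective: alternative
-- what changed: B replaces A's per-group slicing loop (cumulative index + teams[idx:idx+size]) by a single scatter pass: it builds a flat list of group labels, appends each team to its bucket in one zip pass, and assembles the lettered dict from the buckets.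
import Mathlib
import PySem

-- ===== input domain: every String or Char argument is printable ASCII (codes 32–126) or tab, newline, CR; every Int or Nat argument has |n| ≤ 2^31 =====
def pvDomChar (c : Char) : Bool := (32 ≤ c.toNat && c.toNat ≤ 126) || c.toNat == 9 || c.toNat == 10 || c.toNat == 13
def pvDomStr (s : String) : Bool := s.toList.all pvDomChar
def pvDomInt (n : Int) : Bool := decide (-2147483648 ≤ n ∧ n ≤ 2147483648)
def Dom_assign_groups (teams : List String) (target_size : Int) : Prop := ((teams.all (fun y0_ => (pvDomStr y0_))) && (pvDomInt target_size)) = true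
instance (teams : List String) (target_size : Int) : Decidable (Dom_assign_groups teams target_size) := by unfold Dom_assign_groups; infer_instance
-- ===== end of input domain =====

-- B replaces A's per-group slicing loop by one scatter pass: a flat list of group labels,
-- one pass over the teams appending each into its bucket, and the lettered dict built from the buckets
-- (objective: alternative decomposition, same cost).

-- ===== PORT A =====
-- chr(ord('A') + g), ported by hand as Char.ofNat (exact for the code points reached here)
def pvCode (g : Int) : String := String.ofList [Char.ofNat (65 + g.toNat)]

def assign_groups (teams : List String) (target_size : Int) : List (String × List String) :=
  let n : Int := teams.length
  -- math.ceil(n / target_size) ported as the integer ceiling -((-n) // target_size); exact at these magnitudes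
  let num_groups : Int := max 1 (-(PySem.Int.floordiv (-n) target_size))
  let base_size : Int := PySem.Int.floordiv n num_groups
  let extra : Int := PySem.Int.mod n num_groups
  let st := (PySem.List.pyRange 0 num_groups 1).foldl
    (fun (st : PySem.Dict String (List String) × Int) g =>
      let size : Int := base_size + (if g < extra then 1 else 0)
      (st.1.insert (pvCode g) (PySem.List.slice teams (some st.2) (some (st.2 + size))), st.2 + size))
    (PySem.Dict.empty, 0)
  st.1.items

-- ===== PORT B =====
def assign_groups_alt (teams : List String) (target_size : Int) : List (String × List String) :=
  let n : Int := teams.length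
  let num_groups : Int := max 1 (-(PySem.Int.floordiv (-n) target_size))
  let base : Int := PySem.Int.floordiv n num_groups
  let extra : Int := PySem.Int.mod n num_groups
  let labels : List Int := (PySem.List.pyRange 0 num_groups 1).flatMap
    (fun g => List.replicate (base + (if g < extra then 1 else 0)).toNat g)
  let buckets0 : List (List String) := (PySem.List.pyRange 0 num_groups 1).map (fun _ => [])
  -- buckets[g].append(team): functional update of the g-th bucket
  let buckets := (teams.zip labels).foldl
    (fun (bs : List (List String)) p => bs.set p.2.toNat (bs.getD p.2.toNat [] ++ [p.1])) buckets0
  ((PySem.List.pyRange 0 num_groups 1).foldl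
    (fun (d : PySem.Dict String (List String)) g => d.insert (pvCode g) (buckets.getD g.toNat []))
    PySem.Dict.empty).items

-- ===== PRECONDITION & SPEC =====
-- Pre_ excludes only target_size = 0, on which the Python A (and B) raises ZeroDivisionError.
def Pre_assign_groups (teams : List String) (target_size : Int) : Prop := target_size ≠ 0
instance (teams : List String) (target_size : Int) : Decidable (Pre_assign_groups teams target_size) := by unfold Pre_assign_groups; infer_instance
def pvWitness_assign_groups : List String × Int := (["ann", "bob", "cid", "dee", "eli"], 2)

def Spec_assign_groups (teams : List String) (target_size : Int) (out : List (String × List String)) : Prop := out = assign_groups_alt teams target_size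
instance (teams : List String) (target_size : Int) (out : List (String × List String)) : Decidable (Spec_assign_groups teams target_size out) := by unfold Spec_assign_groups; infer_instance

-- ===== CLAIM (what is proved, stated in full; the proofs are below) =====
def Claim_equal_assign_groups : Prop := ∀ (teams : List String) (target_size : Int), Dom_assign_groups teams target_size → Pre_assign_groups teams target_size → Spec_assign_groups teams target_size (assign_groups teams target_size)

-- ===== LEMMAS AND PROOFS =====

-- size of group g when n items are split into K groups, A's rule: first n % K groups get one extra
def pvSz (n K g : Nat) : Nat := n / K + (if g < n % K then 1 else 0)

-- offset of group j (sum of the sizes of groups 0..j-1)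
def pvOff (n K : Nat) : Nat → Nat
  | 0 => 0
  | j + 1 => pvOff n K j + pvSz n K j

-- total size of groups j..j+m-1
def pvSum (n K : Nat) : Nat → Nat → Nat
  | _, 0 => 0
  | j, m + 1 => pvSz n K j + pvSum n K (j + 1) (m)

-- the chunks of ts for groups j..j+m-1, in order
def pvChunks (n K : Nat) : List String → Nat → Nat → List (List String)
  | _, _, 0 => []
  | ts, j, m + 1 => ts.take (pvSz n K j) :: pvChunks n K (ts.drop (pvSz n K j)) (j + 1) m

-- insert chunks cs for groups j, j+1, … into the dict, in order
def pvMkD : Nat → List (List String) → PySem.Dict String (List String) → PySem.Dict String (List String)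
  | _, [], d => d
  | j, c :: cs, d => pvMkD (j + 1) cs (d.insert (pvCode (j : Int)) c)

theorem pvSum_general (n K : Nat) : ∀ (m j : Nat),
    pvSum n K j m = m * (n / K) + (min (j + m) (n % K) - min j (n % K)) := by
  intro m
  induction m with
  | zero => intro j; simp [pvSum]
  | succ m ih =>
    intro j
    rw [pvSum, ih (j + 1), pvSz, Nat.succ_mul]
    split_ifs <;> omega

theorem pvSum_self (n K : Nat) (hK : 0 < K) : pvSum n K 0 K = n := by
  have h1 := Nat.div_add_mod n K
  have h2 := Nat.mod_lt n hK
  rw [pvSum_general]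
  omega

theorem pvChunks_length (n K : Nat) : ∀ (m : Nat) (ts : List String) (j : Nat),
    (pvChunks n K ts j m).length = m := by
  intro m
  induction m with
  | zero => intro ts j; simp [pvChunks]
  | succ m ih => intro ts j; simp [pvChunks, ih]

theorem pvZipRep (g : Int) : ∀ (a : List String),
    a.zip (List.replicate a.length g) = a.map (fun x => (x, g)) := by
  intro a
  induction a with
  | nil => simp
  | cons x a ih => simp [List.replicate_succ, ih]

theorem pvBlock : ∀ (a : List String) (pre rest : List (List String)) (cur : List String),
    List.foldl (fun (bs : List (List String)) (p : String × Int) =>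
        bs.set p.2.toNat (bs.getD p.2.toNat [] ++ [p.1]))
      (pre ++ cur :: rest) (a.map (fun x => (x, (pre.length : Int))))
    = pre ++ (cur ++ a) :: rest := by
  intro a
  induction a with
  | nil => intro pre rest cur; simp
  | cons x a ih =>
    intro pre rest cur
    rw [List.map_cons, List.foldl_cons]
    have hget : (pre ++ cur :: rest).getD (((pre.length : Int)).toNat) [] = cur := by
      simp [List.getD_eq_getElem?_getD]
    have hset : (pre ++ cur :: rest).set (((pre.length : Int)).toNat) (cur ++ [x])
        = pre ++ (cur ++ [x]) :: rest := by
      simp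
    rw [hget, hset, ih pre rest (cur ++ [x])]
    simp

theorem pvScatter (n K : Nat) : ∀ (m j : Nat) (pre : List (List String)) (ts : List String),
    pre.length = j → ts.length = pvSum n K j m →
    List.foldl (fun (bs : List (List String)) (p : String × Int) =>
        bs.set p.2.toNat (bs.getD p.2.toNat [] ++ [p.1]))
      (pre ++ List.replicate m [])
      (ts.zip ((List.range' j m).flatMap (fun g => List.replicate (pvSz n K g) ((g : Int)))))
    = pre ++ pvChunks n K ts j m := by
  intro m
  induction m with
  | zero => intro j pre ts hpre hts; simp [pvChunks]
  | succ m ih =>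
    intro j pre ts hpre hts
    subst hpre
    rw [pvSum] at hts
    have hlen : (ts.take (pvSz n K pre.length)).length = pvSz n K pre.length := by simp; omega
    have hsplit : ts = ts.take (pvSz n K pre.length) ++ ts.drop (pvSz n K pre.length) :=
      (List.take_append_drop _ _).symm
    rw [List.range'_succ, List.flatMap_cons]
    conv_lhs => rw [hsplit]
    rw [List.zip_append (by simp [hlen]), List.foldl_append]
    have hrep : List.replicate (pvSz n K pre.length) ((pre.length : Int))
        = List.replicate (ts.take (pvSz n K pre.length)).length ((pre.length : Int)) := by rw [hlen]
    rw [hrep, pvZipRep, List.replicate_succ, pvBlock, List.nil_append]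
    have hpre' : (pre ++ [ts.take (pvSz n K pre.length)]).length = pre.length + 1 := by simp
    have hts' : (ts.drop (pvSz n K pre.length)).length = pvSum n K (pre.length + 1) m := by
      simp; omega
    have hih := ih (pre.length + 1) (pre ++ [ts.take (pvSz n K pre.length)])
      (ts.drop (pvSz n K pre.length)) hpre' hts'
    rw [show pre ++ ts.take (pvSz n K pre.length) :: List.replicate m []
        = (pre ++ [ts.take (pvSz n K pre.length)]) ++ List.replicate m [] by simp]
    rw [hih, pvChunks]
    simp

theorem pvAgo (teams : List String) (n K : Nat) : ∀ (m j : Nat) (d : PySem.Dict String (List String)),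
    List.foldl (fun (st : PySem.Dict String (List String) × Int) (k : Nat) =>
        (st.1.insert (pvCode (k : Int))
          (PySem.List.slice teams (some st.2) (some (st.2 + ((pvSz n K k : Nat) : Int)))),
         st.2 + ((pvSz n K k : Nat) : Int)))
      (d, ((pvOff n K j : Nat) : Int)) (List.range' j m)
    = (pvMkD j (pvChunks n K (teams.drop (pvOff n K j)) j m) d, ((pvOff n K (j + m) : Nat) : Int)) := by
  intro m
  induction m with
  | zero => intro j d; simp [pvChunks, pvMkD]
  | succ m ih =>
    intro j d
    rw [List.range'_succ, List.foldl_cons]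
    have hslice : PySem.List.slice teams (some ((pvOff n K j : Nat) : Int))
        (some (((pvOff n K j : Nat) : Int) + ((pvSz n K j : Nat) : Int)))
        = (teams.drop (pvOff n K j)).take (pvSz n K j) :=
      PySem.List.slice_natCast_add teams (pvOff n K j) (pvSz n K j)
    have hoff : ((pvOff n K j : Nat) : Int) + ((pvSz n K j : Nat) : Int)
        = ((pvOff n K (j + 1) : Nat) : Int) := by
      rw [pvOff]; push_cast; ring
    rw [hslice, hoff, ih (j + 1)]
    have hdrop : (teams.drop (pvOff n K j)).drop (pvSz n K j) = teams.drop (pvOff n K (j + 1)) := by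
      rw [List.drop_drop, pvOff]
    rw [pvChunks, pvMkD, hdrop]
    have : j + 1 + m = j + (m + 1) := by omega
    rw [this]

theorem pvBgo (full : List (List String)) : ∀ (cs pre : List (List String))
    (d : PySem.Dict String (List String)), full = pre ++ cs →
    List.foldl (fun (d : PySem.Dict String (List String)) (k : Nat) =>
        d.insert (pvCode (k : Int)) (full.getD k []))
      d (List.range' pre.length cs.length)
    = pvMkD pre.length cs d := by
  intro cs
  induction cs with
  | nil => intro pre d h; simp [pvMkD]
  | cons c cs ih =>
    intro pre d h
    rw [List.length_cons, List.range'_succ, List.foldl_cons]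
    have hget : full.getD pre.length [] = c := by
      rw [h]
      simp [List.getD_eq_getElem?_getD]
    have h' : full = (pre ++ [c]) ++ cs := by rw [h]; simp
    have := ih (pre ++ [c]) (d.insert (pvCode (pre.length : Int)) c) h'
    simp only [List.length_append, List.length_cons, List.length_nil, Nat.zero_add] at this
    rw [hget, pvMkD, ← this]

-- ===== VERDICT (by name: the statement is the Claim_ definition above) =====
theorem pvSizeCast (a b k : Nat) :
    ((a : Int) + if ((k : Nat) : Int) < ((b : Nat) : Int) then (1:Int) else 0)
    = (((a + if k < b then 1 else 0) : Nat) : Int) := by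
  split_ifs with h1 h2 h2 <;> push_cast <;> omega

theorem pvSz_def (n K g : Nat) : n / K + (if g < n % K then 1 else 0) = pvSz n K g := rfl

theorem assign_groups_spec : Claim_equal_assign_groups := by
  intro teams t _hdom _hpre
  unfold Spec_assign_groups assign_groups assign_groups_alt
  dsimp only
  obtain ⟨K, hK, hKpos⟩ : ∃ K : Nat,
      max 1 (-(PySem.Int.floordiv (-(teams.length : Int)) t)) = (K : Int) ∧ 0 < K := by
    refine ⟨(max 1 (-(PySem.Int.floordiv (-(teams.length : Int)) t))).toNat, ?_, ?_⟩
    · exact (Int.toNat_of_nonneg (by have := le_max_left (1:Int) (-(PySem.Int.floordiv (-(teams.length : Int)) t)); omega)).symm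
    · have := le_max_left (1:Int) (-(PySem.Int.floordiv (-(teams.length : Int)) t)); omega
  rw [hK]
  rw [PySem.List.pyRange_zero_natCast, PySem.Int.floordiv_natCast, PySem.Int.mod_natCast]
  rw [List.flatMap_map, List.foldl_map, List.foldl_map, List.map_map]
  simp only [pvSizeCast, pvSz_def, Int.toNat_natCast, List.range_eq_range']
  have hsum : teams.length = pvSum teams.length K 0 K := (pvSum_self _ _ hKpos).symm
  have hscat := pvScatter teams.length K K 0 [] teams (by simp) hsum
  rw [List.nil_append, List.nil_append] at hscat
  have hbk : List.map ((fun _ => ([] : List String)) ∘ fun k : Nat => ((k : Nat) : Int))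
      (List.range' 0 K) = List.replicate K ([] : List String) := by
    simp [Function.comp_def, List.map_const']
  rw [hbk, hscat]
  have hA := pvAgo teams teams.length K K 0 PySem.Dict.empty
  simp only [pvOff, Nat.cast_zero, List.drop_zero] at hA
  rw [hA]
  have hB := pvBgo (pvChunks teams.length K teams 0 K) (pvChunks teams.length K teams 0 K) []
    PySem.Dict.empty (by simp)
  simp only [List.length_nil, pvChunks_length] at hB
  rw [hB]
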